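-- pv_equiv track=rewrite | github.com/GabrielSessions/TicTacThrow | js/pythonCode/isWin.py | inDiagonal
-- ===== SOURCE A (Python) =====
-- def inDiagonal(board, row, col, distance, color):
--     if distance == 0:
--         return True
--
--     if row < 0 or row > 3 or col < 0 or col > 3:
--         return False
--
--     if board[row][col] == color and inDiagonal(board, row + 1, col + 1, distance - 1, color):
--         return True
--     else:
--         return False
-- ===== SOURCE B (Python) =====
-- def inDiagonal(board, row, col, distance, color):
--     # closed-form window check + single bounded scan, instead of A's step recursion
--     if distance == 0:
--         return True
--     if distance < 0:
--         return False
--     if row < 0 or col < 0 or row + distance - 1 > 3 or col + distance - 1 > 3: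
--         return False
--     return all(board[row + k][col + k] == color for k in range(distance))
-- ===== Notes on version B (the rewrite author's own statement) =====
-- stated objective: alternative
-- what changed: Replaces A's one-cell-per-call recursion with a closed-form window/sign check followed by a single bounded scan (all over range(distance)) of the diagonal cells.
-- outside the precondition, e.g. on inDiagonal([[5]], 0, 0, 2, 7): A returns False, B returns False
import Mathlib
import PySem

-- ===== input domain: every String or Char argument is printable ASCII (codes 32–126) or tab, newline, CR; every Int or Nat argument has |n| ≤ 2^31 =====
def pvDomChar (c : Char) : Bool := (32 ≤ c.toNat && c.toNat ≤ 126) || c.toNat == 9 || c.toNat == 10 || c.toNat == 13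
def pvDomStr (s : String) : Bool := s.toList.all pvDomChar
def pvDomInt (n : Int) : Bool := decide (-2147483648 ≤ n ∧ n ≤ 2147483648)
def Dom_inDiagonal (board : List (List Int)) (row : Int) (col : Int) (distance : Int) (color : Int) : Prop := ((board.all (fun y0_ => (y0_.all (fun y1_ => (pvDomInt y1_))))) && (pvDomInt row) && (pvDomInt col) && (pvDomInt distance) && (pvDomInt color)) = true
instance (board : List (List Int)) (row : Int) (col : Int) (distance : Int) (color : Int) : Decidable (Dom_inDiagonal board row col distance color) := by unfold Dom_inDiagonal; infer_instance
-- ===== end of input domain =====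

-- B replaces A's per-cell recursion by a closed-form window check plus one bounded scan; same cost, no recursion.

-- board[r][c] as an Option (none = IndexError)
def pvCell (board : List (List Int)) (r : Int) (c : Int) : Option Int :=
  (PySem.List.pyGet? board r).bind (fun xs => PySem.List.pyGet? xs c)

-- ===== PORT A =====
def inDiagonal (board : List (List Int)) (row : Int) (col : Int) (distance : Int) (color : Int) : Bool :=
  if distance = 0 then true
  else if row < 0 ∨ 3 < row ∨ col < 0 ∨ 3 < col then false
  else match pvCell board row col with
    | none => false   -- Python raises IndexError here; excluded by Pre_
    | some v => v == color && inDiagonal board (row + 1) (col + 1) (distance - 1) color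
termination_by (4 - row).toNat
decreasing_by omega

-- ===== PORT B =====
def inDiagonal_alt (board : List (List Int)) (row : Int) (col : Int) (distance : Int) (color : Int) : Bool :=
  if distance = 0 then true
  else if distance < 0 then false
  else if row < 0 ∨ col < 0 ∨ 3 < row + distance - 1 ∨ 3 < col + distance - 1 then false
  else (PySem.List.pyRange 0 distance 1).all
         (fun k => pvCell board (row + k) (col + k) == some color)

-- ===== PRECONDITION & SPEC =====
-- Pre_ excludes inputs where Python A reaches a board cell that does not exist: on most of them A
-- raises IndexError; it also excludes some inputs where A returns False after stopping on a color
-- mismatch before the missing cell (a defensible over-exclusion, see claim cites).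
def Pre_inDiagonal (board : List (List Int)) (row : Int) (col : Int) (distance : Int) (color : Int) : Prop :=
  0 ≤ row → row ≤ 3 → 0 ≤ col → col ≤ 3 →
  ∀ k ∈ PySem.List.pyRange 0 (if distance < 0 then 4 - row else min distance (4 - row)) 1,
    col + k ≤ 3 →
      (row + k < (board.length : Int) ∧ col + k < ((board.getD (row + k).toNat []).length : Int))
instance (board : List (List Int)) (row : Int) (col : Int) (distance : Int) (color : Int) : Decidable (Pre_inDiagonal board row col distance color) := by unfold Pre_inDiagonal; infer_instance

def pvWitness_inDiagonal : List (List Int) × Int × Int × Int × Int :=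
  ([[1,0,0,0],[0,1,0,0],[0,0,1,0],[0,0,0,1]], 0, 0, 4, 1)

def Spec_inDiagonal (board : List (List Int)) (row : Int) (col : Int) (distance : Int) (color : Int) (out : Bool) : Prop := out = inDiagonal_alt board row col distance color
instance (board : List (List Int)) (row : Int) (col : Int) (distance : Int) (color : Int) (out : Bool) : Decidable (Spec_inDiagonal board row col distance color out) := by unfold Spec_inDiagonal; infer_instance

-- ===== CLAIM (what is proved, stated in full; the proofs are below) =====
def Claim_equal_inDiagonal : Prop := ∀ (board : List (List Int)) (row : Int) (col : Int) (distance : Int) (color : Int), Dom_inDiagonal board row col distance color → Pre_inDiagonal board row col distance color → Spec_inDiagonal board row col distance color (inDiagonal board row col distance color)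

-- ===== LEMMAS AND PROOFS =====

theorem alt_neg (board : List (List Int)) (row col distance color : Int) (h : distance < 0) :
    inDiagonal_alt board row col distance color = false := by
  unfold inDiagonal_alt; rw [if_neg (by omega), if_pos h]

theorem alt_guard (board : List (List Int)) (row col distance color : Int) (hd : 0 < distance)
    (h : row < 0 ∨ col < 0 ∨ 3 < row + distance - 1 ∨ 3 < col + distance - 1) :
    inDiagonal_alt board row col distance color = false := by
  unfold inDiagonal_alt; rw [if_neg (by omega), if_neg (by omega), if_pos h]

theorem alt_out (board : List (List Int)) (row col distance color : Int) (hd : distance ≠ 0)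
    (h : row < 0 ∨ 3 < row ∨ col < 0 ∨ 3 < col) :
    inDiagonal_alt board row col distance color = false := by
  by_cases hneg : distance < 0
  · exact alt_neg _ _ _ _ _ hneg
  · exact alt_guard _ _ _ _ _ (by omega) (by omega)

theorem alt_unroll (board : List (List Int)) (row col distance color : Int) (hd : distance ≠ 0)
    (hr0 : 0 ≤ row) (hr3 : row ≤ 3) (hc0 : 0 ≤ col) (hc3 : col ≤ 3) :
    inDiagonal_alt board row col distance color =
      (match pvCell board row col with
       | none => false
       | some v => v == color && inDiagonal_alt board (row + 1) (col + 1) (distance - 1) color) := by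
  by_cases hneg : distance < 0
  · rw [alt_neg _ _ _ _ _ hneg]
    cases hcell : pvCell board row col with
    | none => rfl
    | some v => rw [alt_neg _ _ _ _ _ (by omega)]; simp
  · have hpos : 0 < distance := by omega
    by_cases hg : 3 < row + distance - 1 ∨ 3 < col + distance - 1
    · rw [alt_guard _ _ _ _ _ hpos (by omega)]
      have hd2 : 2 ≤ distance := by omega
      cases hcell : pvCell board row col with
      | none => rfl
      | some v => rw [alt_guard _ _ _ _ _ (by omega) (by omega)]; simp
    · conv_lhs => rw [inDiagonal_alt]
      rw [if_neg hd, if_neg hneg, if_neg (by omega)]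
      rw [PySem.List.pyRange_one_cons (by omega : (0:Int) < distance)]
      rw [List.all_cons]
      have htail : (PySem.List.pyRange (0 + 1) distance 1).all
            (fun k => pvCell board (row + k) (col + k) == some color)
          = inDiagonal_alt board (row + 1) (col + 1) (distance - 1) color := by
        by_cases h1 : distance = 1
        · subst h1
          rw [PySem.List.pyRange_one_eq_nil (by omega)]
          unfold inDiagonal_alt
          rw [if_pos (by omega)]
          rfl
        · conv_rhs => rw [inDiagonal_alt]
          rw [if_neg (by omega), if_neg (by omega), if_neg (by omega)]
          rw [PySem.List.pyRange_one, PySem.List.pyRange_one]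
          simp only [List.all_map, Function.comp_def, add_assoc, zero_add, sub_zero]
      rw [htail]
      cases hcell : pvCell board row col with
      | none => simp [hcell]
      | some v => simp [hcell]

theorem a_eq_alt (board : List (List Int)) (row col distance color : Int) :
    inDiagonal board row col distance color = inDiagonal_alt board row col distance color := by
  fun_induction inDiagonal board row col distance color with
  | case1 row col =>
      unfold inDiagonal_alt; rw [if_pos rfl]
  | case2 row col distance hd hout =>
      rw [alt_out _ _ _ _ _ hd hout]
  | case3 row col distance hd hout hcell =>
      rw [alt_unroll _ _ _ _ _ hd (by omega) (by omega) (by omega) (by omega), hcell]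
  | case4 row col distance hd hout v hcell ih =>
      rw [alt_unroll _ _ _ _ _ hd (by omega) (by omega) (by omega) (by omega), hcell, ih]

-- ===== VERDICT (by name: the statement is the Claim_ definition above) =====
theorem inDiagonal_spec : Claim_equal_inDiagonal := by
  intro board row col distance color _ _
  unfold Spec_inDiagonal
  exact a_eq_alt board row col distance color
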